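-- pv_equiv track=rewrite | github.com/pranithbottu/Python_Work | hw4.py | alphabet_finder
-- ===== SOURCE A (Python) =====
-- def alphabet_finder(sentence):
-- 	"""
-- 	Given a string, returns the shortest substring that:
-- 		1. starts from the beginning of the string
-- 		2. contains all the letters of the alphabet (case insensitive)
-- 	If this is never true, return None.
--
-- 	Args:
-- 		(str) sentence: the input string
--
-- 	Returns:
-- 		(str) the shortest substring of sentence that satisfies both (1) and (2).
-- 	"""
-- 	alphabet = "abcdefghijklmnopqrstuvwxyz"
-- 	if len(sentence) == 26:
-- 		if alphabet in sentence:
-- 			return sentence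
-- 	else:
-- 		indexArray = [0, 0, 0, 0, 0, 0, 0, 0, 0, 0, 0, 0, 0, 0, 0, 0, 0, 0, 0, 0, 0, 0, 0, 0, 0, 0]
-- 		countArray = [0, 0, 0, 0, 0, 0, 0, 0, 0, 0, 0, 0, 0, 0, 0, 0, 0, 0, 0, 0, 0, 0, 0, 0, 0, 0]
-- 		alphaArray = sorted(alphabet)
-- 		for i, j in enumerate(sentence):
-- 			for k in range(0, len(alphaArray)):
-- 				if alphaArray[k] == j:
-- 					countArray[k] += 1
-- 					if countArray[k] < 2:
-- 						indexArray[k] = i + 1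
-- 		return sentence[:max(indexArray)]
-- ===== SOURCE B (Python) =====
-- def alphabet_finder(sentence):
--     alphabet = "abcdefghijklmnopqrstuvwxyz"
--     if len(sentence) == 26:
--         if alphabet in sentence:
--             return sentence
--         return None
--     return sentence[:max(sentence.find(c) for c in alphabet) + 1]
-- ===== Notes on version B (the rewrite author's own statement) =====
-- stated objective: faster
-- what changed: Transposed the traversal: instead of A's pass over the sentence with a 26-way inner scan maintaining count and index arrays plus a final max, B does one str.find per alphabet letter and slices at max(finds)+1, keeping no per-character loop state.
import Mathlib
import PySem

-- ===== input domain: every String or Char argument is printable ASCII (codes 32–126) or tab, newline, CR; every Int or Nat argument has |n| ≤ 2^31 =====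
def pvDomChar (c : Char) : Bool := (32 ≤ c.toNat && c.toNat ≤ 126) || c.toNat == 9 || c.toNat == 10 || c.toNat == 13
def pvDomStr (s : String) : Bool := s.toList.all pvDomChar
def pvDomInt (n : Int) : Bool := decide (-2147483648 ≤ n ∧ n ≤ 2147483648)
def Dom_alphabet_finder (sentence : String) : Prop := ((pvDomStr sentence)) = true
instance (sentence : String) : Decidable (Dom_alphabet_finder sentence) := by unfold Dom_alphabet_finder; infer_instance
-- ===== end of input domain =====

-- B transposes the traversal: one str.find per alphabet letter and a slice at max(finds)+1,
-- instead of A's per-character pass with a 26-way inner scan over two arrays (objective: faster, measured).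

-- ===== PORT A =====
-- one iteration of A's inner `for k in range(0, len(alphaArray))` loop body
def pvInnerStep (alphaArray : List Char) (i : Int) (j : Char)
    (st : List Int × List Int) (k : Int) : List Int × List Int :=
  if PySem.List.pyGetD alphaArray k ' ' = j then
    let countArray := PySem.List.pySetD st.2 k (PySem.List.pyGetD st.2 k 0 + 1)
    let indexArray :=
      if PySem.List.pyGetD countArray k 0 < 2 then
        PySem.List.pySetD st.1 k (i + 1)
      else st.1
    (indexArray, countArray)
  else st

def alphabet_finder (sentence : String) : Option String :=
  let alphabet := "abcdefghijklmnopqrstuvwxyz"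
  if PySem.Str.len sentence = 26 then
    if PySem.Str.isIn alphabet sentence then some sentence else none
  else
    let indexArray : List Int := [0,0,0,0,0,0,0,0,0,0,0,0,0,0,0,0,0,0,0,0,0,0,0,0,0,0]
    let countArray : List Int := [0,0,0,0,0,0,0,0,0,0,0,0,0,0,0,0,0,0,0,0,0,0,0,0,0,0]
    let alphaArray := PySem.List.sorted alphabet.toList (fun x => x) false
    let st :=
      (PySem.List.enumerate sentence.toList 0).foldl
        (fun st p =>
          (PySem.List.pyRange 0 (alphaArray.length : Int) 1).foldl
            (pvInnerStep alphaArray p.1 p.2) st)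
        (indexArray, countArray)
    -- max(indexArray): none models Python's ValueError on an empty list (never reached)
    match PySem.List.max? st.1 (fun x => x) with
    | some m => some (PySem.Str.slice sentence none (some m))
    | none => none

-- ===== PORT B =====
def alphabet_finder_alt (sentence : String) : Option String :=
  let alphabet := "abcdefghijklmnopqrstuvwxyz"
  if PySem.Str.len sentence = 26 then
    if PySem.Str.isIn alphabet sentence then some sentence else none
  else
    let finds := alphabet.toList.map (fun c => PySem.Str.find sentence (String.ofList [c]))
    -- max(generator): none models Python's ValueError on an empty sequence (finds has 26 elements)
    match PySem.List.max? finds (fun x => x) with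
    | some m => some (PySem.Str.slice sentence none (some (m + 1)))
    | none => none

-- ===== PRECONDITION & SPEC =====
def Spec_alphabet_finder (sentence : String) (out : Option String) : Prop := out = alphabet_finder_alt sentence
instance (sentence : String) (out : Option String) : Decidable (Spec_alphabet_finder sentence out) := by unfold Spec_alphabet_finder; infer_instance

-- ===== CLAIM (what is proved, stated in full; the proofs are below) =====
def Claim_equal_alphabet_finder : Prop := ∀ (sentence : String), Dom_alphabet_finder sentence → Spec_alphabet_finder sentence (alphabet_finder sentence)

-- ===== LEMMAS AND PROOFS =====

def pvAlpha : List Char := "abcdefghijklmnopqrstuvwxyz".toList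

theorem pvAlpha_sorted :
    PySem.List.sorted "abcdefghijklmnopqrstuvwxyz".toList (fun x => x) false = pvAlpha := by
  decide

theorem pvAlpha_nodup : pvAlpha.Nodup := by decide

theorem pvAlpha_length : pvAlpha.length = 26 := by decide

def pvZeros : List Int := [0,0,0,0,0,0,0,0,0,0,0,0,0,0,0,0,0,0,0,0,0,0,0,0,0,0]

theorem pvZeros_getD (k : Nat) : pvZeros.getD k 0 = 0 := by
  have hlen : pvZeros.length = 26 := by decide
  rw [List.getD_eq_getElem?_getD]
  rcases lt_or_ge k 26 with hk | hk
  · rw [List.getElem?_eq_getElem (by omega)]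
    have hall : ∀ x ∈ pvZeros, x = 0 := by decide
    simpa using hall _ (List.getElem_mem _)
  · rw [List.getElem?_eq_none (by omega)]
    rfl

theorem pvGetD_set_self (l : List Int) (k : Nat) (v : Int) (h : k < l.length) :
    (l.set k v).getD k 0 = v := by
  simp [List.getD_eq_getElem?_getD, h]

theorem pvGetD_set_ne (l : List Int) (k j : Nat) (v : Int) (h : j ≠ k) :
    (l.set k v).getD j 0 = l.getD j 0 := by
  simp [List.getD_eq_getElem?_getD, List.getElem?_set_ne (by omega : k ≠ j)]

-- A's inner loop when the char matches no slot among the scanned indices: nothing happens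
theorem pvInner_not_mem (i : Int) (j : Char) (hj : j ∉ pvAlpha) :
    ∀ (l : List Int) (st : List Int × List Int),
      (∀ k ∈ l, 0 ≤ k ∧ k < 26) →
      l.foldl (pvInnerStep pvAlpha i j) st = st := by
  intro l
  induction l with
  | nil => intro st _; rfl
  | cons k t ih =>
    intro st hb
    obtain ⟨h0, h26⟩ := hb k (List.mem_cons_self)
    have hIn : PySem.Raise.InRange pvAlpha.length k := by
      unfold PySem.Raise.InRange
      rw [pvAlpha_length]
      constructor <;> omega
    have : pvInnerStep pvAlpha i j st k = st := by
      unfold pvInnerStep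
      have hne : PySem.List.pyGetD pvAlpha k ' ' ≠ j := by
        intro he
        exact hj (he ▸ PySem.List.pyGetD_mem pvAlpha ' ' hIn)
      simp [hne]
    rw [List.foldl_cons, this]
    exact ih st (fun x hx => hb x (List.mem_cons_of_mem _ hx))

-- A's inner loop over a stretch of indices all differing from j's slot: nothing happens
theorem pvInner_skip (i : Int) (j : Char) (k0 : Nat) (hk0 : k0 < 26)
    (hj : pvAlpha[k0]'(by rw [pvAlpha_length]; omega) = j) :
    ∀ (l : List Int) (st : List Int × List Int),
      (∀ k ∈ l, 0 ≤ k ∧ k < 26 ∧ k ≠ (k0 : Int)) →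
      l.foldl (pvInnerStep pvAlpha i j) st = st := by
  intro l
  induction l with
  | nil => intro st _; rfl
  | cons k t ih =>
    intro st hb
    obtain ⟨h0, h26, hkne⟩ := hb k (List.mem_cons_self)
    have : pvInnerStep pvAlpha i j st k = st := by
      unfold pvInnerStep
      have hget : PySem.List.pyGetD pvAlpha k ' ' = pvAlpha[k.toNat]'(by rw [pvAlpha_length]; omega) :=
        PySem.List.pyGetD_eq_getElem pvAlpha ' ' h0 (by rw [pvAlpha_length]; omega)
      have hne : pvAlpha[k.toNat]'(by rw [pvAlpha_length]; omega) ≠ j := by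
        intro he
        have : k.toNat = k0 := (List.Nodup.getElem_inj_iff pvAlpha_nodup).mp (by rw [he, hj])
        omega
      rw [hget]
      simp [hne]
    rw [List.foldl_cons, this]
    exact ih st (fun x hx => hb x (List.mem_cons_of_mem _ hx))

-- characterization of one full inner loop for a lowercase letter j = pvAlpha[k0]
theorem pvInner_hit (i : Int) (j : Char) (k0 : Nat) (hk0 : k0 < 26)
    (hj : pvAlpha[k0]'(by rw [pvAlpha_length]; omega) = j)
    (idx cnt : List Int) (hc : cnt.length = 26) :
    (PySem.List.pyRange 0 26 1).foldl (pvInnerStep pvAlpha i j) (idx, cnt) =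
      (if cnt.getD k0 0 + 1 < 2 then idx.set k0 (i + 1) else idx,
       cnt.set k0 (cnt.getD k0 0 + 1)) := by
  have hsplit1 : PySem.List.pyRange 0 26 1 =
      PySem.List.pyRange 0 (k0 : Int) 1 ++ PySem.List.pyRange (k0 : Int) 26 1 :=
    PySem.List.pyRange_one_append 0 (k0 : Int) 26 (by omega) (by omega)
  have hsplit2 : PySem.List.pyRange (k0 : Int) 26 1 =
      (k0 : Int) :: PySem.List.pyRange ((k0 : Int) + 1) 26 1 :=
    PySem.List.pyRange_one_cons (by omega)
  rw [hsplit1, List.foldl_append, hsplit2, List.foldl_cons]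
  rw [pvInner_skip i j k0 hk0 hj (PySem.List.pyRange ((k0 : Int) + 1) 26 1) _ (by
    intro k hk
    rw [PySem.List.mem_pyRange_one] at hk
    exact ⟨by omega, by omega, by omega⟩)]
  rw [pvInner_skip i j k0 hk0 hj (PySem.List.pyRange 0 (k0 : Int) 1) _ (by
    intro k hk
    rw [PySem.List.mem_pyRange_one] at hk
    exact ⟨by omega, by omega, by omega⟩)]
  have hstep : pvInnerStep pvAlpha i j (idx, cnt) (k0 : Int) =
      (if cnt.getD k0 0 + 1 < 2 then idx.set k0 (i + 1) else idx,
       cnt.set k0 (cnt.getD k0 0 + 1)) := by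
    unfold pvInnerStep
    have hget : PySem.List.pyGetD pvAlpha (k0 : Int) ' ' = pvAlpha[k0]'(by rw [pvAlpha_length]; omega) := by
      have := PySem.List.pyGetD_eq_getElem pvAlpha (i := (k0 : Int)) ' ' (by omega)
        (by rw [pvAlpha_length]; omega)
      simpa using this
    have hcget : PySem.List.pyGetD cnt (k0 : Int) 0 = cnt.getD k0 0 := by simp
    have hcset : PySem.List.pySetD cnt (k0 : Int) (cnt.getD k0 0 + 1) =
        cnt.set k0 (cnt.getD k0 0 + 1) := by simp
    have hiset : PySem.List.pySetD idx (k0 : Int) (i + 1) = idx.set k0 (i + 1) := by simp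
    have hcget2 : PySem.List.pyGetD (cnt.set k0 (cnt.getD k0 0 + 1)) (k0 : Int) 0 =
        cnt.getD k0 0 + 1 := by
      have : (cnt.set k0 (cnt.getD k0 0 + 1)).getD k0 0 = cnt.getD k0 0 + 1 :=
        pvGetD_set_self cnt k0 _ (by omega)
      simpa using this
    rw [hget, if_pos hj]
    simp only [hcget, hcset, hiset, hcget2]
  exact hstep

def pvStepA (st : List Int × List Int) (p : Int × Char) : List Int × List Int :=
  (PySem.List.pyRange 0 26 1).foldl (pvInnerStep pvAlpha p.1 p.2) st

-- A's outer loop: slot k of the index array ends as first-occurrence-position + 1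
theorem pvA_loop (cs : List Char) :
    ∀ (s : Nat) (idx cnt : List Int),
      idx.length = 26 → cnt.length = 26 → (∀ k, k < 26 → 0 ≤ cnt.getD k 0) →
      ((PySem.List.enumerate cs (s : Int)).foldl pvStepA (idx, cnt)).1.length = 26 ∧
      ∀ k, (hk : k < 26) →
        ((PySem.List.enumerate cs (s : Int)).foldl pvStepA (idx, cnt)).1.getD k 0 =
          if 0 < cnt.getD k 0 then idx.getD k 0
          else match cs.findIdx? (· == pvAlpha[k]'(by rw [pvAlpha_length]; omega)) with
               | some i => (s : Int) + i + 1
               | none => idx.getD k 0 := by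
  induction cs with
  | nil =>
    intro s idx cnt hli hlc _
    refine ⟨by simpa [PySem.List.enumerate_nil] using hli, ?_⟩
    intro k hk
    simp [PySem.List.enumerate_nil, List.findIdx?_nil]
  | cons c t ih =>
    intro s idx cnt hli hlc hnn
    rw [PySem.List.enumerate_cons]
    simp only [List.foldl_cons]
    have hcast : (s : Int) + 1 = ((s + 1 : Nat) : Int) := by push_cast; ring
    by_cases hcl : c ∈ pvAlpha
    · obtain ⟨k0, hk0', hjk0⟩ := List.mem_iff_getElem.mp hcl
      have hk0 : k0 < 26 := by rw [pvAlpha_length] at hk0'; exact hk0'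
      have hstepA : pvStepA (idx, cnt) ((s : Int), c) =
          (if cnt.getD k0 0 + 1 < 2 then idx.set k0 ((s : Int) + 1) else idx,
           cnt.set k0 (cnt.getD k0 0 + 1)) :=
        pvInner_hit (s : Int) c k0 hk0 hjk0 idx cnt hlc
      rw [hstepA, hcast]
      set idx' := if cnt.getD k0 0 + 1 < 2 then idx.set k0 (((s + 1 : Nat) : Int)) else idx with hidx'
      have hli' : idx'.length = 26 := by
        rw [hidx']; split <;> simp [hli]
      obtain ⟨hfl, hfv⟩ := ih (s + 1) idx' (cnt.set k0 (cnt.getD k0 0 + 1)) hli'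
        (by simp [hlc])
        (by
          intro k hk
          rcases eq_or_ne k k0 with rfl | hne
          · rw [pvGetD_set_self cnt k _ (by omega)]; have := hnn k hk; omega
          · rw [pvGetD_set_ne cnt k0 k _ hne]; exact hnn k hk)
      refine ⟨hfl, ?_⟩
      intro k hk
      rw [hfv k hk]
      rcases eq_or_ne k k0 with rfl | hne
      · -- the slot of c itself
        have hcnt' : (cnt.set k (cnt.getD k 0 + 1)).getD k 0 = cnt.getD k 0 + 1 :=
          pvGetD_set_self cnt k _ (by omega)
        have hbeq : (c == pvAlpha[k]'(by rw [pvAlpha_length]; omega)) = true := by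
          simp [hjk0]
        rw [hcnt', List.findIdx?_cons]
        simp only [hbeq, if_true]
        by_cases hpos : 0 < cnt.getD k 0
        · have h1 : (0 : Int) < cnt.getD k 0 + 1 := by omega
          have h2 : ¬ (cnt.getD k 0 + 1 < 2) := by omega
          rw [if_pos h1, if_pos hpos, hidx', if_neg h2]
        · have h1 : (0 : Int) < cnt.getD k 0 + 1 := by have := hnn k hk; omega
          have h2 : cnt.getD k 0 + 1 < 2 := by have := hnn k hk; omega
          rw [if_pos h1, if_neg hpos, hidx', if_pos h2]
          rw [pvGetD_set_self idx k _ (by omega)]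
          push_cast; ring
      · -- any other slot: the step leaves it unchanged, the first occurrence shifts by one
        have hcnt' : (cnt.set k0 (cnt.getD k0 0 + 1)).getD k 0 = cnt.getD k 0 :=
          pvGetD_set_ne cnt k0 k _ hne
        have hidxk : idx'.getD k 0 = idx.getD k 0 := by
          rw [hidx']; split
          · exact pvGetD_set_ne idx k0 k _ hne
          · rfl
        have hbeq : (c == pvAlpha[k]'(by rw [pvAlpha_length]; omega)) = false := by
          rw [beq_eq_false_iff_ne]
          intro he
          have : k0 = k := (List.Nodup.getElem_inj_iff pvAlpha_nodup).mp (by rw [hjk0, he])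
          omega
        rw [hcnt', hidxk, List.findIdx?_cons]
        simp only [hbeq, Bool.false_eq_true, if_false]
        by_cases hpos : 0 < cnt.getD k 0
        · rw [if_pos hpos, if_pos hpos]
        · rw [if_neg hpos, if_neg hpos]
          cases hfi : t.findIdx? (· == pvAlpha[k]'(by rw [pvAlpha_length]; omega)) with
          | none => simp
          | some i =>
            simp only [Option.map_some]
            push_cast; ring_nf
    · -- c is not one of the 26 letters: the whole inner loop is the identity
      have hstepA : pvStepA (idx, cnt) ((s : Int), c) = (idx, cnt) := by
        unfold pvStepA
        exact pvInner_not_mem (s : Int) c hcl _ _ (by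
          intro k hk
          rw [PySem.List.mem_pyRange_one] at hk
          exact ⟨by omega, by omega⟩)
      rw [hstepA, hcast]
      obtain ⟨hfl, hfv⟩ := ih (s + 1) idx cnt hli hlc hnn
      refine ⟨hfl, ?_⟩
      intro k hk
      rw [hfv k hk]
      have hbeq : (c == pvAlpha[k]'(by rw [pvAlpha_length]; omega)) = false := by
        rw [beq_eq_false_iff_ne]
        intro he
        exact hcl (he ▸ List.getElem_mem _)
      rw [List.findIdx?_cons]
      simp only [hbeq, Bool.false_eq_true, if_false]
      by_cases hpos : 0 < cnt.getD k 0
      · rw [if_pos hpos, if_pos hpos]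
      · rw [if_neg hpos, if_neg hpos]
        cases hfi : t.findIdx? (· == pvAlpha[k]'(by rw [pvAlpha_length]; omega)) with
        | none => simp
        | some i =>
          simp only [Option.map_some]
          push_cast; ring_nf

-- s.find of a single-character string is the first-occurrence index, -1 if absent
theorem pvFind_singleton (l : List Char) (c : Char) :
    PySem.Chars.find l [c] =
      match l.findIdx? (· == c) with
      | some i => (i : Int)
      | none => -1 := by
  cases hfi : l.findIdx? (· == c) with
  | none =>
    have hnm : c ∉ l := by
      intro hm
      have := List.findIdx?_eq_none_iff.mp hfi c hm
      simp at this
    exact (PySem.Chars.find_eq_neg_one_iff _ _).mpr (by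
      rw [List.singleton_infix_iff]; exact hnm)
  | some i =>
    obtain ⟨hil, hpi, hmin⟩ := List.findIdx?_eq_some_iff_getElem.mp hfi
    have hci : l[i] = c := by simpa using hpi
    have hpre : ∀ j, [c] <+: l.drop j ↔ l[j]? = some c := by
      intro j
      cases hd : l.drop j with
      | nil =>
        have : l[j]? = none := by
          rw [List.getElem?_eq_none_iff]
          have := congrArg List.length hd
          simp at this
          omega
        simp [this]
      | cons x xs =>
        have hx : l[j]? = some x := by
          have := congrArg (fun t => t.head?) hd
          simpa [List.head?_drop] using this
        constructor
        · rintro ⟨t2, ht⟩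
          simp at ht
          rw [hx, ht.1]
        · intro hj
          rw [hx, Option.some_inj] at hj
          exact ⟨xs, by simp [hj]⟩
    have hnonneg : 0 ≤ PySem.Chars.find l [c] := by
      rw [PySem.Chars.find_nonneg_iff, List.singleton_infix_iff]
      exact hci ▸ List.getElem_mem hil
    obtain ⟨hat, hfirst⟩ := PySem.Chars.find_spec hnonneg
    set F := (PySem.Chars.find l [c]).toNat with hF
    have hFi : F = i := by
      have h1 : ¬ i < F := by
        intro hlt
        exact hfirst i hlt ((hpre i).mpr (by rw [List.getElem?_eq_getElem hil, hci]))
      have h2 : ¬ F < i := by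
        intro hlt
        have hsome := (hpre F).mp hat
        have hFl : F < l.length := (List.getElem?_eq_some_iff.mp hsome).1
        have hval : l[F] = c := by
          rw [List.getElem?_eq_getElem hFl] at hsome
          exact Option.some_inj.mp hsome
        exact hmin F hlt (by simp [hval])
      omega
    show PySem.Chars.find l [c] = (i : Int)
    omega

-- max over a list shifted by one
theorem pvFoldlMax_add_one (t : List Int) : ∀ (a : Int),
    (t.map (fun x => x + 1)).foldl max (a + 1) = t.foldl max a + 1 := by
  induction t with
  | nil => intro a; rfl
  | cons x xs ih =>
    intro a
    simp only [List.map_cons, List.foldl_cons]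
    rw [max_add_add_right]
    exact ih (max a x)

theorem pvMax_map_add_one (l : List Int) :
    PySem.List.max? (l.map (fun x => x + 1)) (fun x => x) =
      (PySem.List.max? l (fun x => x)).map (fun x => x + 1) := by
  cases l with
  | nil => rfl
  | cons a t =>
    rw [List.map_cons, PySem.List.max?_id_cons, PySem.List.max?_id_cons]
    simp [pvFoldlMax_add_one]

-- ===== VERDICT (by name: the statement is the Claim_ definition above) =====
theorem alphabet_finder_spec : Claim_equal_alphabet_finder := by
  unfold Claim_equal_alphabet_finder Spec_alphabet_finder
  intro sentence _
  unfold alphabet_finder alphabet_finder_alt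
  by_cases hlen : PySem.Str.len sentence = 26
  · simp only [if_pos hlen]
  · simp only [if_neg hlen]
    simp only [pvAlpha_sorted, pvAlpha_length, Nat.cast_ofNat]
    obtain ⟨hfl, hfv⟩ := pvA_loop sentence.toList 0 pvZeros pvZeros (by decide) (by decide)
      (by intro k _; rw [pvZeros_getD])
    simp only [Nat.cast_zero] at hfl hfv
    rw [show (fun (st : List Int × List Int) (p : Int × Char) =>
        List.foldl (pvInnerStep pvAlpha p.1 p.2) st (PySem.List.pyRange 0 26 1)) = pvStepA from rfl]
    rw [show (([0,0,0,0,0,0,0,0,0,0,0,0,0,0,0,0,0,0,0,0,0,0,0,0,0,0],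
        [0,0,0,0,0,0,0,0,0,0,0,0,0,0,0,0,0,0,0,0,0,0,0,0,0,0]) : List Int × List Int) =
        (pvZeros, pvZeros) from rfl]
    set stA := (PySem.List.enumerate sentence.toList 0).foldl pvStepA (pvZeros, pvZeros) with hstA
    have hfinds :
        stA.1 = ("abcdefghijklmnopqrstuvwxyz".toList.map
          (fun c => PySem.Str.find sentence (String.ofList [c]))).map (fun x => x + 1) := by
      apply List.ext_getElem
      · rw [hfl]
        simp only [List.length_map]
        decide
      · intro k hk1 hk2
        have hk : k < 26 := by rw [hfl] at hk1; exact hk1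
        have hk' : k < pvAlpha.length := by rw [pvAlpha_length]; exact hk
        have h1 : stA.1[k]'hk1 = stA.1.getD k 0 := by
          rw [List.getD_eq_getElem?_getD, List.getElem?_eq_getElem hk1]; rfl
        rw [h1, hfv k hk, pvZeros_getD]
        simp only [show "abcdefghijklmnopqrstuvwxyz".toList = pvAlpha from rfl]
        simp only [List.getElem_map, PySem.Str.find_eq, String.toList_ofList]
        rw [pvFind_singleton sentence.toList (pvAlpha[k]'hk')]
        simp only [lt_irrefl, if_false]
        cases hfi : sentence.toList.findIdx? (· == pvAlpha[k]'hk') with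
        | none => simp
        | some i => simp
    rw [hfinds, pvMax_map_add_one]
    cases hm : PySem.List.max?
        ("abcdefghijklmnopqrstuvwxyz".toList.map
          (fun c => PySem.Str.find sentence (String.ofList [c]))) (fun x => x) with
    | none =>
      exfalso
      have := PySem.List.max?_eq_none_iff (κ := Int)
        ("abcdefghijklmnopqrstuvwxyz".toList.map
          (fun c => PySem.Str.find sentence (String.ofList [c]))) (fun x => x)
      rw [this] at hm
      simp at hm
    | some m => simp
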